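-- pv_equiv track=rewrite | github.com/shubhanshu0006/Assignment_ques | advanced/A10.py | customers_without_computer
-- ===== SOURCE A (Python) =====
-- def customers_without_computer(N, S):
--     occupied = set()
--     walked_away = 0
--     for customer in S:
--         if customer not in occupied:
--             occupied.add(customer)
--         else:
--
--             occupied.remove(customer)
--
--
--     walked_away = N - len(occupied)
--
--     return walked_away
-- ===== SOURCE B (Python) =====
-- def customers_without_computer(N, S):
--     # Phase 1: frequency table of S.
--     counts = {}
--     for c in S:
--         counts[c] = counts.get(c, 0) + 1
--     # Phase 2: a customer still at a computer iff their toggle count is odd.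
--     odd = sum(1 for v in counts.values() if v % 2)
--     return N - odd
-- ===== Notes on version B (the rewrite author's own statement) =====
-- stated objective: alternative
-- what changed: Replaces the single-pass membership-toggle over a set by a two-phase count-then-filter: build a frequency table of S, then count customers with an odd occurrence count.
import Mathlib
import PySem

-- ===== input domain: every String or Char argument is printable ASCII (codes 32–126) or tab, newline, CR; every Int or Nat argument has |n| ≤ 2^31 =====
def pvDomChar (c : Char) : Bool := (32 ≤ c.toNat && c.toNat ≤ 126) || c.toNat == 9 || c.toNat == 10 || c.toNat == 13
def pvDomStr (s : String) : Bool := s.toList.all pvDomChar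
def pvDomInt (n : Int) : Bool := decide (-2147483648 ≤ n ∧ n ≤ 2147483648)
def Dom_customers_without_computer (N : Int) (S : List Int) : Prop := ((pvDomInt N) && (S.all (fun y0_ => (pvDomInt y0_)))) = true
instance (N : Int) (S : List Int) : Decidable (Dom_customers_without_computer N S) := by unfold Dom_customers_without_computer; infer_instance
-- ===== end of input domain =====

-- B replaces A's single-pass set-toggle by a two-phase count-then-filter (frequency table, then odd-parity count); alternative structure, same cost.

-- ===== PORT A =====
-- the toggle step of A's loop body (remove? is guarded by the membership test, so .getD is never the fallback)
def pvToggle (occ : PySem.Set Int) (customer : Int) : PySem.Set Int :=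
  if !(PySem.Set.contains occ customer) then PySem.Set.add occ customer
  else (PySem.Set.remove? occ customer).getD occ

def customers_without_computer (N : Int) (S : List Int) : Int :=
  let occupied := S.foldl pvToggle PySem.Set.empty
  N - (occupied.length : Int)

-- ===== PORT B =====
def customers_without_computer_alt (N : Int) (S : List Int) : Int :=
  let counts := S.foldl (fun d c => d.insert c (d.getD c 0 + 1)) (PySem.Dict.empty : PySem.Dict Int Int)
  let odd := ((PySem.Dict.values counts).filter (fun v => !(PySem.Int.mod v 2 == 0))).length
  N - (odd : Int)

-- ===== PRECONDITION & SPEC =====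
def Spec_customers_without_computer (N : Int) (S : List Int) (out : Int) : Prop := out = customers_without_computer_alt N S
instance (N : Int) (S : List Int) (out : Int) : Decidable (Spec_customers_without_computer N S out) := by unfold Spec_customers_without_computer; infer_instance

-- ===== CLAIM (what is proved, stated in full; the proofs are below) =====
def Claim_equal_customers_without_computer : Prop := ∀ (N : Int) (S : List Int), Dom_customers_without_computer N S → Spec_customers_without_computer N S (customers_without_computer N S)

-- ===== LEMMAS AND PROOFS =====

lemma pvToggle_eq (occ : PySem.Set Int) (c : Int) :
    pvToggle occ c = if c ∈ occ then occ.discard c else occ.add c := by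
  unfold pvToggle
  by_cases hm : c ∈ occ <;> simp [hm, PySem.Set.remove?_of_mem]

lemma pvToggle_nodup (occ : PySem.Set Int) (c : Int) (h : occ.Nodup) : (pvToggle occ c).Nodup := by
  rw [pvToggle_eq]
  split_ifs
  · exact PySem.Set.nodup_discard occ c h
  · exact PySem.Set.nodup_add occ c h

lemma pvToggle_mem (occ : PySem.Set Int) (c x : Int) :
    x ∈ pvToggle occ c ↔ ((x ∈ occ ∧ x ≠ c) ∨ (x ∉ occ ∧ x = c)) := by
  rw [pvToggle_eq]
  by_cases hm : c ∈ occ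
  · simp only [hm, if_true, PySem.Set.mem_discard]
    constructor
    · rintro ⟨h1, h2⟩; exact Or.inl ⟨h1, h2⟩
    · rintro (⟨h1, h2⟩ | ⟨h1, h2⟩)
      · exact ⟨h1, h2⟩
      · exact absurd (h2 ▸ hm) h1
  · simp only [hm, if_false, PySem.Set.mem_add]
    constructor
    · rintro (h | h)
      · exact Or.inl ⟨h, fun he => hm (he ▸ h)⟩
      · by_cases hx : x ∈ occ
        · exact Or.inl ⟨hx, fun he => hm (he ▸ hx)⟩
        · exact Or.inr ⟨hx, h⟩
    · rintro (⟨h1, _⟩ | ⟨_, h2⟩)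
      · exact Or.inl h1
      · exact Or.inr h2

lemma pvFold_invariant (S : List Int) (st : PySem.Set Int) (h : st.Nodup) :
    (S.foldl pvToggle st).Nodup ∧
      ∀ x, x ∈ S.foldl pvToggle st ↔ (x ∈ st ↔ S.count x % 2 = 0) := by
  induction S generalizing st with
  | nil => exact ⟨h, fun x => by simp⟩
  | cons c S ih =>
    obtain ⟨hn, hm⟩ := ih (pvToggle st c) (pvToggle_nodup st c h)
    refine ⟨hn, fun x => ?_⟩
    rw [List.foldl_cons, hm x, pvToggle_mem]
    have hc : (c :: S).count x = S.count x + if x = c then 1 else 0 := by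
      rw [List.count_cons]; simp only [beq_iff_eq, @eq_comm _ c x]
    rw [hc]
    by_cases he : x = c <;> by_cases hs : S.count x % 2 = 0 <;>
      by_cases hst : x ∈ st <;> simp_all <;> omega

lemma pvFold_len (S : List Int) :
    (S.foldl pvToggle PySem.Set.empty).length =
      ((PySem.Set.ofList S).filter (fun k => !(PySem.Int.mod ((S.count k : Int)) 2 == 0))).length := by
  obtain ⟨hn, hm⟩ := pvFold_invariant S PySem.Set.empty (by simp [PySem.Set.empty])
  have hodd : ∀ v : Int, (!(PySem.Int.mod v 2 == 0)) = true ↔ ¬ v % 2 = 0 := by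
    intro v; simp [PySem.Int.mod, Int.fmod_eq_emod]
  have hperm : (S.foldl pvToggle PySem.Set.empty).Perm
      ((PySem.Set.ofList S).filter (fun k => !(PySem.Int.mod ((S.count k : Int)) 2 == 0))) := by
    rw [List.perm_ext_iff_of_nodup hn ((PySem.Set.nodup_ofList S).filter _)]
    intro x
    rw [hm x, List.mem_filter, PySem.Set.mem_ofList, hodd]
    have hcount : x ∈ S ↔ 0 < S.count x := (List.count_pos_iff).symm
    constructor
    · intro hyp
      have h1 : ¬ S.count x % 2 = 0 := by simpa [PySem.Set.empty] using hyp
      exact ⟨hcount.mpr (by omega), by omega⟩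
    · rintro ⟨hmem, hq⟩
      simp only [PySem.Set.empty, List.not_mem_nil, false_iff]
      intro hzero
      have : ¬ ((S.count x : Int) % 2 = 0) := hq
      omega
  exact hperm.length_eq

-- ===== VERDICT (by name: the statement is the Claim_ definition above) =====
theorem customers_without_computer_spec : Claim_equal_customers_without_computer := by
  intro N S _
  unfold Spec_customers_without_computer customers_without_computer customers_without_computer_alt
  simp only [PySem.Dict.foldl_insert_getD_add_one_eq_counter]
  have hv : (PySem.Dict.counter S).values = (PySem.Set.ofList S).map (fun k => ((S.count k : Int))) := by
    simp [PySem.Dict.values, PySem.Dict.items_counter]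
  rw [hv, List.filter_map, List.length_map]
  have := pvFold_len S
  simp only [Function.comp_def] at *
  rw [this]
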